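-- pv_equiv track=rewrite | github.com/ZPP-MURMURAS/ZPP_Murmuras | src/bert_pipeline/bert_pipeline.py | coupon_to_json_first
-- ===== SOURCE A (Python) =====
-- from typing import List, Dict
--
-- NER_ENTITY_GROUP = "entity_group"
--
-- NER_TEXT = "word"
--
-- TAG_PRODUCT_NAME = "PRODUCT-NAME"
--
-- TAG_DISCOUNT_TEXT = "DISCOUNT-TEXT"
--
-- TAG_VALIDITY_TEXT = "VALIDITY-TEXT"
--
-- TAG_ACTIVATION_TEXT = "ACTIVATION-TEXT"
--
-- COUPON_PRODUCT_NAME = "product_name"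
--
-- COUPON_DISCOUNT_TEXT = "discount_text"
--
-- COUPON_VALID_UNTIL = "valid_until"
--
-- COUPON_ACTIVATION_TEXT = "activation_text"
--
-- def coupon_to_json_first(model_coupon: List[Dict[str, any]]) -> Dict[str, str]:
--     """Converts a coupon tagged by the model to a JSON object. Only the first entity of each type is considered."""
--     coupon = {COUPON_PRODUCT_NAME: "",
--               COUPON_DISCOUNT_TEXT: "",
--               COUPON_VALID_UNTIL: "",
--               COUPON_ACTIVATION_TEXT: ""}
--
--     for entity in reversed(model_coupon):
--         if entity[NER_ENTITY_GROUP] == TAG_PRODUCT_NAME: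
--             coupon[COUPON_PRODUCT_NAME] = entity[NER_TEXT]
--         elif entity[NER_ENTITY_GROUP] == TAG_DISCOUNT_TEXT:
--             coupon[COUPON_DISCOUNT_TEXT] = entity[NER_TEXT]
--         elif entity[NER_ENTITY_GROUP] == TAG_VALIDITY_TEXT:
--             coupon[COUPON_VALID_UNTIL] = entity[NER_TEXT]
--         elif entity[NER_ENTITY_GROUP] == TAG_ACTIVATION_TEXT:
--             coupon[COUPON_ACTIVATION_TEXT] = entity[NER_TEXT]
--
--     return coupon
-- ===== SOURCE B (Python) =====
-- from typing import List, Dict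
--
-- NER_ENTITY_GROUP = "entity_group"
-- NER_TEXT = "word"
--
-- TAG_TO_KEY = {
--     "PRODUCT-NAME": "product_name",
--     "DISCOUNT-TEXT": "discount_text",
--     "VALIDITY-TEXT": "valid_until",
--     "ACTIVATION-TEXT": "activation_text",
-- }
--
-- def coupon_to_json_first(model_coupon: List[Dict[str, any]]) -> Dict[str, str]:
--     """First entity of each type, via a forward scan with a seen-set and a tag->key table."""
--     coupon = {key: "" for key in TAG_TO_KEY.values()}
--     seen = set()
--     for entity in model_coupon:
--         tag = entity[NER_ENTITY_GROUP]
--         key = TAG_TO_KEY.get(tag)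
--         if key is not None and tag not in seen:
--             coupon[key] = entity[NER_TEXT]
--             seen.add(tag)
--     return coupon
-- ===== Notes on version B (the rewrite author's own statement) =====
-- stated objective: idiomatic
-- what changed: A scans the entities in reversed order with an if/elif chain so the last write (= first occurrence) wins; B scans forward once with a TAG_TO_KEY lookup table and a seen-set, writing each coupon key at its first occurrence only.
import Mathlib
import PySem

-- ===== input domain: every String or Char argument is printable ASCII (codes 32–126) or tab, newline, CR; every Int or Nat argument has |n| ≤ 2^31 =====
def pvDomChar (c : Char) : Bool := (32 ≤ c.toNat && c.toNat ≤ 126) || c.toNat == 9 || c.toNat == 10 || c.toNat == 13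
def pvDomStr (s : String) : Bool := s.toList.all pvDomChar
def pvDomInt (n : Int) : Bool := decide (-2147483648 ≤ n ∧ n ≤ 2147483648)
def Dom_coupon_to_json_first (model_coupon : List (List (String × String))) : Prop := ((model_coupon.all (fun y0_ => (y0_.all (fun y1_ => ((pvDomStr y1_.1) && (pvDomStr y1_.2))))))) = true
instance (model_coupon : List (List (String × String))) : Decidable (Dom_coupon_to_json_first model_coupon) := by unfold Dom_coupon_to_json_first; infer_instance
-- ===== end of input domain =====

-- B replaces A's reversed last-write-wins scan by a forward scan with a tag->key table and a seen-set (idiomatic, same cost).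

-- ===== PORT A =====
-- entity[k] for an entity dict; Pre_ guarantees the key is present wherever the Python reads it
def entGet (e : List (String × String)) (k : String) : String := (PySem.Dict.mk e).getD k ""

def stepA (coupon : PySem.Dict String String) (entity : List (String × String)) : PySem.Dict String String :=
  if entGet entity "entity_group" == "PRODUCT-NAME" then coupon.insert "product_name" (entGet entity "word")
  else if entGet entity "entity_group" == "DISCOUNT-TEXT" then coupon.insert "discount_text" (entGet entity "word")
  else if entGet entity "entity_group" == "VALIDITY-TEXT" then coupon.insert "valid_until" (entGet entity "word")
  else if entGet entity "entity_group" == "ACTIVATION-TEXT" then coupon.insert "activation_text" (entGet entity "word")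
  else coupon

def coupon_to_json_first (model_coupon : List (List (String × String))) : List (String × String) :=
  let coupon : PySem.Dict String String :=
    (((((PySem.Dict.empty : PySem.Dict String String)).insert "product_name" "").insert "discount_text" "").insert "valid_until" "").insert "activation_text" ""
  (model_coupon.reverse.foldl stepA coupon).items

-- ===== PORT B =====
def tagToKey : PySem.Dict String String :=
  PySem.Dict.mk [("PRODUCT-NAME", "product_name"), ("DISCOUNT-TEXT", "discount_text"),
                 ("VALIDITY-TEXT", "valid_until"), ("ACTIVATION-TEXT", "activation_text")]

def stepB (st : PySem.Dict String String × PySem.Set String) (entity : List (String × String)) :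
    PySem.Dict String String × PySem.Set String :=
  let tag := entGet entity "entity_group"
  match tagToKey.get? tag with
  | some key => if PySem.Set.contains st.2 tag then st
                else (st.1.insert key (entGet entity "word"), PySem.Set.add st.2 tag)
  | none => st

def coupon_to_json_first_alt (model_coupon : List (List (String × String))) : List (String × String) :=
  let coupon : PySem.Dict String String :=
    tagToKey.values.foldl (fun d key => d.insert key "") (PySem.Dict.empty : PySem.Dict String String)
  (model_coupon.foldl stepB (coupon, (PySem.Set.empty : PySem.Set String))).1.items

-- ===== PRECONDITION & SPEC =====
-- Pre_ excludes exactly the inputs where the Python raises KeyError: an entity without "entity_group",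
-- or a tagged entity without "word".
def Pre_coupon_to_json_first (model_coupon : List (List (String × String))) : Prop :=
  ∀ e ∈ model_coupon, (PySem.Dict.mk e).contains "entity_group" = true ∧
    ((PySem.Dict.mk e).getD "entity_group" "" ∈
        (["PRODUCT-NAME", "DISCOUNT-TEXT", "VALIDITY-TEXT", "ACTIVATION-TEXT"] : List String) →
      (PySem.Dict.mk e).contains "word" = true)
instance (model_coupon : List (List (String × String))) : Decidable (Pre_coupon_to_json_first model_coupon) := by
  unfold Pre_coupon_to_json_first; infer_instance

def pvWitness_coupon_to_json_first : (List (List (String × String))) :=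
  [[("entity_group", "PRODUCT-NAME"), ("word", "Milk")], [("entity_group", "O")]]

def Spec_coupon_to_json_first (model_coupon : List (List (String × String))) (out : List (String × String)) : Prop := out = coupon_to_json_first_alt model_coupon
instance (model_coupon : List (List (String × String))) (out : List (String × String)) : Decidable (Spec_coupon_to_json_first model_coupon out) := by unfold Spec_coupon_to_json_first; infer_instance

-- ===== CLAIM (what is proved, stated in full; the proofs are below) =====
def Claim_equal_coupon_to_json_first : Prop := ∀ (model_coupon : List (List (String × String))), Dom_coupon_to_json_first model_coupon → Pre_coupon_to_json_first model_coupon → Spec_coupon_to_json_first model_coupon (coupon_to_json_first model_coupon)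

-- ===== LEMMAS AND PROOFS =====
-- the first entity of l whose group is t gives its word, else the default a
def pick (t : String) (l : List (List (String × String))) (a : String) : String :=
  match l.find? (fun e => entGet e "entity_group" == t) with
  | some e => entGet e "word"
  | none => a

def mk4 (a b c d : String) : PySem.Dict String String :=
  PySem.Dict.mk [("product_name", a), ("discount_text", b), ("valid_until", c), ("activation_text", d)]

theorem pick_nil (t a) : pick t [] a = a := rfl

theorem pick_cons_pos (t : String) (e l a) (h : entGet e "entity_group" = t) :
    pick t (e :: l) a = entGet e "word" := by
  simp [pick, h]

theorem pick_cons_neg (t : String) (e l a) (h : ¬ entGet e "entity_group" = t) :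
    pick t (e :: l) a = pick t l a := by
  simp [pick, h]

theorem contains_add_self (s : PySem.Set String) (u : String) :
    PySem.Set.contains (PySem.Set.add s u) u = true := by
  rw [PySem.Set.contains_iff, PySem.Set.mem_add]; exact Or.inr rfl

theorem contains_add_ne (s : PySem.Set String) (u t : String) (h : t ≠ u) :
    PySem.Set.contains (PySem.Set.add s u) t = PySem.Set.contains s t := by
  rw [Bool.eq_iff_iff, PySem.Set.contains_iff, PySem.Set.contains_iff, PySem.Set.mem_add]
  exact ⟨fun h' => h'.resolve_right h, Or.inl⟩

theorem insert_mk4_pn (a b c d w) : (mk4 a b c d).insert "product_name" w = mk4 w b c d := by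
  apply PySem.Dict.ext; simp [mk4, PySem.Dict.items_insert, PySem.Dict.contains]

theorem insert_mk4_dt (a b c d w) : (mk4 a b c d).insert "discount_text" w = mk4 a w c d := by
  apply PySem.Dict.ext; simp [mk4, PySem.Dict.items_insert, PySem.Dict.contains]

theorem insert_mk4_vu (a b c d w) : (mk4 a b c d).insert "valid_until" w = mk4 a b w d := by
  apply PySem.Dict.ext; simp [mk4, PySem.Dict.items_insert, PySem.Dict.contains]

theorem insert_mk4_at (a b c d w) : (mk4 a b c d).insert "activation_text" w = mk4 a b c w := by
  apply PySem.Dict.ext; simp [mk4, PySem.Dict.items_insert, PySem.Dict.contains]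

theorem foldA_mk4 (l : List (List (String × String))) : ∀ a b c d,
    l.foldr (fun e cp => stepA cp e) (mk4 a b c d) =
      mk4 (pick "PRODUCT-NAME" l a) (pick "DISCOUNT-TEXT" l b)
          (pick "VALIDITY-TEXT" l c) (pick "ACTIVATION-TEXT" l d) := by
  induction l with
  | nil => intro a b c d; simp [pick_nil]
  | cons e l ih =>
    intro a b c d
    simp only [List.foldr_cons, ih]
    by_cases h1 : entGet e "entity_group" = "PRODUCT-NAME"
    · rw [pick_cons_pos "PRODUCT-NAME" e l a h1,
        pick_cons_neg "DISCOUNT-TEXT" e l b (by rw [h1]; decide),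
        pick_cons_neg "VALIDITY-TEXT" e l c (by rw [h1]; decide),
        pick_cons_neg "ACTIVATION-TEXT" e l d (by rw [h1]; decide)]
      simp [stepA, h1, insert_mk4_pn]
    · by_cases h2 : entGet e "entity_group" = "DISCOUNT-TEXT"
      · rw [pick_cons_neg "PRODUCT-NAME" e l a h1,
          pick_cons_pos "DISCOUNT-TEXT" e l b h2,
          pick_cons_neg "VALIDITY-TEXT" e l c (by rw [h2]; decide),
          pick_cons_neg "ACTIVATION-TEXT" e l d (by rw [h2]; decide)]
        simp [stepA, h2, insert_mk4_dt]
      · by_cases h3 : entGet e "entity_group" = "VALIDITY-TEXT"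
        · rw [pick_cons_neg "PRODUCT-NAME" e l a h1,
            pick_cons_neg "DISCOUNT-TEXT" e l b h2,
            pick_cons_pos "VALIDITY-TEXT" e l c h3,
            pick_cons_neg "ACTIVATION-TEXT" e l d (by rw [h3]; decide)]
          simp [stepA, h3, insert_mk4_vu]
        · by_cases h4 : entGet e "entity_group" = "ACTIVATION-TEXT"
          · rw [pick_cons_neg "PRODUCT-NAME" e l a h1,
              pick_cons_neg "DISCOUNT-TEXT" e l b h2,
              pick_cons_neg "VALIDITY-TEXT" e l c h3,
              pick_cons_pos "ACTIVATION-TEXT" e l d h4]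
            simp [stepA, h4, insert_mk4_at]
          · rw [pick_cons_neg "PRODUCT-NAME" e l a h1,
              pick_cons_neg "DISCOUNT-TEXT" e l b h2,
              pick_cons_neg "VALIDITY-TEXT" e l c h3,
              pick_cons_neg "ACTIVATION-TEXT" e l d h4]
            simp [stepA, h1, h2, h3, h4]

def pkB (s : PySem.Set String) (t : String) (l : List (List (String × String))) (x : String) : String :=
  if PySem.Set.contains s t then x else pick t l x

theorem pkB_cons_ne (s : PySem.Set String) (t : String) (e l x) (h : ¬ entGet e "entity_group" = t) :
    pkB s t (e :: l) x = pkB s t l x := by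
  unfold pkB; rw [pick_cons_neg t e l x h]

theorem pkB_seen (s : PySem.Set String) (t l x) (hs : PySem.Set.contains s t = true) :
    pkB s t l x = x := by unfold pkB; rw [hs]; rfl

theorem pkB_unseen (s : PySem.Set String) (t l x) (hs : PySem.Set.contains s t = false) :
    pkB s t l x = pick t l x := by unfold pkB; rw [hs]; rfl

theorem pkB_add_self (s : PySem.Set String) (u l w) : pkB (PySem.Set.add s u) u l w = w :=
  pkB_seen _ _ _ _ (contains_add_self s u)

theorem pkB_add_ne (s : PySem.Set String) (u t l x) (h : t ≠ u) :
    pkB (PySem.Set.add s u) t l x = pkB s t l x := by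
  unfold pkB; rw [contains_add_ne s u t h]

theorem foldB_mk4 (l : List (List (String × String))) : ∀ a b c d (s : PySem.Set String),
    (l.foldl stepB (mk4 a b c d, s)).1 =
      mk4 (pkB s "PRODUCT-NAME" l a) (pkB s "DISCOUNT-TEXT" l b)
          (pkB s "VALIDITY-TEXT" l c) (pkB s "ACTIVATION-TEXT" l d) := by
  induction l with
  | nil => intro a b c d s; simp [pkB, pick_nil]
  | cons e l ih =>
    intro a b c d s
    simp only [List.foldl_cons]
    by_cases h1 : entGet e "entity_group" = "PRODUCT-NAME"
    · cases hs : PySem.Set.contains s "PRODUCT-NAME" with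
      | true =>
        have hm : ("PRODUCT-NAME" : String) ∈ s := (PySem.Set.contains_iff s _).mp hs
        have hstep : stepB (mk4 a b c d, s) e = (mk4 a b c d, s) := by
          simp [stepB, h1, tagToKey, PySem.Dict.get?_mk_cons, hm]
        rw [hstep, ih, pkB_seen s "PRODUCT-NAME" (e :: l) a hs, pkB_seen s "PRODUCT-NAME" l a hs,
          pkB_cons_ne s "DISCOUNT-TEXT" e l b (by rw [h1]; decide),
          pkB_cons_ne s "VALIDITY-TEXT" e l c (by rw [h1]; decide),
          pkB_cons_ne s "ACTIVATION-TEXT" e l d (by rw [h1]; decide)]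
      | false =>
        have hm : ("PRODUCT-NAME" : String) ∉ s := fun hm => by
          rw [(PySem.Set.contains_iff s _).mpr hm] at hs; cases hs
        have hstep : stepB (mk4 a b c d, s) e =
      (mk4 (entGet e "word") b c d, PySem.Set.add s "PRODUCT-NAME") := by
          simp [stepB, h1, tagToKey, PySem.Dict.get?_mk_cons, hm, insert_mk4_pn]
        rw [hstep, ih, pkB_add_self s "PRODUCT-NAME" l (entGet e "word"),
          pkB_unseen s "PRODUCT-NAME" (e :: l) a hs,
          pick_cons_pos "PRODUCT-NAME" e l a h1,
          pkB_add_ne s "PRODUCT-NAME" "DISCOUNT-TEXT" l b (by decide),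
          pkB_cons_ne s "DISCOUNT-TEXT" e l b (by rw [h1]; decide),
          pkB_add_ne s "PRODUCT-NAME" "VALIDITY-TEXT" l c (by decide),
          pkB_cons_ne s "VALIDITY-TEXT" e l c (by rw [h1]; decide),
          pkB_add_ne s "PRODUCT-NAME" "ACTIVATION-TEXT" l d (by decide),
          pkB_cons_ne s "ACTIVATION-TEXT" e l d (by rw [h1]; decide)]
    · by_cases h2 : entGet e "entity_group" = "DISCOUNT-TEXT"
      · cases hs : PySem.Set.contains s "DISCOUNT-TEXT" with
        | true =>
          have hm : ("DISCOUNT-TEXT" : String) ∈ s := (PySem.Set.contains_iff s _).mp hs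
          have hstep : stepB (mk4 a b c d, s) e = (mk4 a b c d, s) := by
            simp [stepB, h2, tagToKey, PySem.Dict.get?_mk_cons, hm]
          rw [hstep, ih, pkB_cons_ne s "PRODUCT-NAME" e l a (by rw [h2]; decide),
            pkB_seen s "DISCOUNT-TEXT" (e :: l) b hs, pkB_seen s "DISCOUNT-TEXT" l b hs,
            pkB_cons_ne s "VALIDITY-TEXT" e l c (by rw [h2]; decide),
            pkB_cons_ne s "ACTIVATION-TEXT" e l d (by rw [h2]; decide)]
        | false =>
          have hm : ("DISCOUNT-TEXT" : String) ∉ s := fun hm => by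
            rw [(PySem.Set.contains_iff s _).mpr hm] at hs; cases hs
          have hstep : stepB (mk4 a b c d, s) e =
              (mk4 a (entGet e "word") c d, PySem.Set.add s "DISCOUNT-TEXT") := by
            simp [stepB, h2, tagToKey, PySem.Dict.get?_mk_cons, hm, insert_mk4_dt]
          rw [hstep, ih, pkB_add_ne s "DISCOUNT-TEXT" "PRODUCT-NAME" l a (by decide),
            pkB_cons_ne s "PRODUCT-NAME" e l a (by rw [h2]; decide),
            pkB_add_self s "DISCOUNT-TEXT" l (entGet e "word"),
            pkB_unseen s "DISCOUNT-TEXT" (e :: l) b hs,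
            pick_cons_pos "DISCOUNT-TEXT" e l b h2,
            pkB_add_ne s "DISCOUNT-TEXT" "VALIDITY-TEXT" l c (by decide),
            pkB_cons_ne s "VALIDITY-TEXT" e l c (by rw [h2]; decide),
            pkB_add_ne s "DISCOUNT-TEXT" "ACTIVATION-TEXT" l d (by decide),
            pkB_cons_ne s "ACTIVATION-TEXT" e l d (by rw [h2]; decide)]
      · by_cases h3 : entGet e "entity_group" = "VALIDITY-TEXT"
        · cases hs : PySem.Set.contains s "VALIDITY-TEXT" with
          | true =>
            have hm : ("VALIDITY-TEXT" : String) ∈ s := (PySem.Set.contains_iff s _).mp hs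
            have hstep : stepB (mk4 a b c d, s) e = (mk4 a b c d, s) := by
              simp [stepB, h3, tagToKey, PySem.Dict.get?_mk_cons, hm]
            rw [hstep, ih, pkB_cons_ne s "PRODUCT-NAME" e l a (by rw [h3]; decide),
              pkB_cons_ne s "DISCOUNT-TEXT" e l b (by rw [h3]; decide),
              pkB_seen s "VALIDITY-TEXT" (e :: l) c hs, pkB_seen s "VALIDITY-TEXT" l c hs,
              pkB_cons_ne s "ACTIVATION-TEXT" e l d (by rw [h3]; decide)]
          | false =>
            have hm : ("VALIDITY-TEXT" : String) ∉ s := fun hm => by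
              rw [(PySem.Set.contains_iff s _).mpr hm] at hs; cases hs
            have hstep : stepB (mk4 a b c d, s) e =
                (mk4 a b (entGet e "word") d, PySem.Set.add s "VALIDITY-TEXT") := by
              simp [stepB, h3, tagToKey, PySem.Dict.get?_mk_cons, hm, insert_mk4_vu]
            rw [hstep, ih, pkB_add_ne s "VALIDITY-TEXT" "PRODUCT-NAME" l a (by decide),
              pkB_cons_ne s "PRODUCT-NAME" e l a (by rw [h3]; decide),
              pkB_add_ne s "VALIDITY-TEXT" "DISCOUNT-TEXT" l b (by decide),
              pkB_cons_ne s "DISCOUNT-TEXT" e l b (by rw [h3]; decide),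
              pkB_add_self s "VALIDITY-TEXT" l (entGet e "word"),
              pkB_unseen s "VALIDITY-TEXT" (e :: l) c hs,
              pick_cons_pos "VALIDITY-TEXT" e l c h3,
              pkB_add_ne s "VALIDITY-TEXT" "ACTIVATION-TEXT" l d (by decide),
              pkB_cons_ne s "ACTIVATION-TEXT" e l d (by rw [h3]; decide)]
        · by_cases h4 : entGet e "entity_group" = "ACTIVATION-TEXT"
          · cases hs : PySem.Set.contains s "ACTIVATION-TEXT" with
            | true =>
              have hm : ("ACTIVATION-TEXT" : String) ∈ s := (PySem.Set.contains_iff s _).mp hs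
              have hstep : stepB (mk4 a b c d, s) e = (mk4 a b c d, s) := by
                simp [stepB, h4, tagToKey, PySem.Dict.get?_mk_cons, hm]
              rw [hstep, ih, pkB_cons_ne s "PRODUCT-NAME" e l a (by rw [h4]; decide),
                pkB_cons_ne s "DISCOUNT-TEXT" e l b (by rw [h4]; decide),
                pkB_cons_ne s "VALIDITY-TEXT" e l c (by rw [h4]; decide),
                pkB_seen s "ACTIVATION-TEXT" (e :: l) d hs, pkB_seen s "ACTIVATION-TEXT" l d hs]
            | false =>
              have hm : ("ACTIVATION-TEXT" : String) ∉ s := fun hm => by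
                rw [(PySem.Set.contains_iff s _).mpr hm] at hs; cases hs
              have hstep : stepB (mk4 a b c d, s) e =
                  (mk4 a b c (entGet e "word"), PySem.Set.add s "ACTIVATION-TEXT") := by
                simp [stepB, h4, tagToKey, PySem.Dict.get?_mk_cons, hm, insert_mk4_at]
              rw [hstep, ih, pkB_add_ne s "ACTIVATION-TEXT" "PRODUCT-NAME" l a (by decide),
                pkB_cons_ne s "PRODUCT-NAME" e l a (by rw [h4]; decide),
                pkB_add_ne s "ACTIVATION-TEXT" "DISCOUNT-TEXT" l b (by decide),
                pkB_cons_ne s "DISCOUNT-TEXT" e l b (by rw [h4]; decide),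
                pkB_add_ne s "ACTIVATION-TEXT" "VALIDITY-TEXT" l c (by decide),
                pkB_cons_ne s "VALIDITY-TEXT" e l c (by rw [h4]; decide),
                pkB_add_self s "ACTIVATION-TEXT" l (entGet e "word"),
                pkB_unseen s "ACTIVATION-TEXT" (e :: l) d hs,
                pick_cons_pos "ACTIVATION-TEXT" e l d h4]
          · have g1 : ¬ ("PRODUCT-NAME" : String) = entGet e "entity_group" := fun h => h1 h.symm
            have g2 : ¬ ("DISCOUNT-TEXT" : String) = entGet e "entity_group" := fun h => h2 h.symm
            have g3 : ¬ ("VALIDITY-TEXT" : String) = entGet e "entity_group" := fun h => h3 h.symm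
            have g4 : ¬ ("ACTIVATION-TEXT" : String) = entGet e "entity_group" := fun h => h4 h.symm
            have hstep : stepB (mk4 a b c d, s) e = (mk4 a b c d, s) := by
              simp [stepB, tagToKey, PySem.Dict.get?, g1, g2, g3, g4]
            rw [hstep, ih, pkB_cons_ne s "PRODUCT-NAME" e l a h1, pkB_cons_ne s "DISCOUNT-TEXT" e l b h2, pkB_cons_ne s "VALIDITY-TEXT" e l c h3, pkB_cons_ne s "ACTIVATION-TEXT" e l d h4]

theorem contains_empty_str (t : String) : PySem.Set.contains (PySem.Set.empty : PySem.Set String) t = false := rfl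

theorem coupon_to_json_first_goal (mc : List (List (String × String))) :
    coupon_to_json_first mc = coupon_to_json_first_alt mc := by
  have hinitA : (((((PySem.Dict.empty : PySem.Dict String String)).insert "product_name" "").insert "discount_text" "").insert "valid_until" "").insert "activation_text" "" = mk4 "" "" "" "" := by decide
  have hinitB : tagToKey.values.foldl (fun d key => d.insert key "") (PySem.Dict.empty : PySem.Dict String String) = mk4 "" "" "" "" := by decide
  show (mc.reverse.foldl stepA ((((((PySem.Dict.empty : PySem.Dict String String)).insert "product_name" "").insert "discount_text" "").insert "valid_until" "").insert "activation_text" "")).items =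
    (mc.foldl stepB (tagToKey.values.foldl (fun d key => d.insert key "") (PySem.Dict.empty : PySem.Dict String String), (PySem.Set.empty : PySem.Set String))).1.items
  rw [hinitA, hinitB, List.foldl_reverse, foldA_mk4, foldB_mk4,
    pkB_unseen _ _ _ _ (contains_empty_str _), pkB_unseen _ _ _ _ (contains_empty_str _),
    pkB_unseen _ _ _ _ (contains_empty_str _), pkB_unseen _ _ _ _ (contains_empty_str _)]

-- ===== VERDICT (by name: the statement is the Claim_ definition above) =====
theorem coupon_to_json_first_spec : Claim_equal_coupon_to_json_first := by
  intro mc _ _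
  unfold Spec_coupon_to_json_first
  exact coupon_to_json_first_goal mc
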